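-- pv_equiv track=rewrite | github.com/chouxiaozi1989/sum_positive_differences | optimized_sum_algorithm.py | calculate_with_coordinate_compression
-- ===== SOURCE A (Python) =====
-- from typing import List
--
-- def calculate_with_coordinate_compression(arr: List[int]) -> int:
--     """
--     使用坐标压缩和树状数组的高效算法
--     时间复杂度: O(n log n)
--     """
--     n = len(arr)
--     if n <= 1:
--         return 0
--
--     # 坐标压缩
--     sorted_values = sorted(set(arr))
--     value_to_rank = {v: i + 1 for i, v in enumerate(sorted_values)}
--
--     # Fenwick Tree for counting and sum
--     class FenwickTree:
--         def __init__(self, size):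
--             self.size = size
--             self.count_tree = [0] * (size + 1)
--             self.sum_tree = [0] * (size + 1)
--
--         def update(self, idx, val):
--             while idx <= self.size:
--                 self.count_tree[idx] += 1
--                 self.sum_tree[idx] += val
--                 idx += idx & (-idx)
--
--         def query_count(self, idx):
--             count = 0
--             while idx > 0:
--                 count += self.count_tree[idx]
--                 idx -= idx & (-idx)
--             return count
--
--         def query_sum(self, idx):
--             total = 0
--             while idx > 0:
--                 total += self.sum_tree[idx]
--                 idx -= idx & (-idx)
--             return total
--
--     ft = FenwickTree(len(sorted_values))
--     total_sum = 0
--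
--     for j in range(n):
--         current_val = arr[j]
--         current_rank = value_to_rank[current_val]
--
--         # 查询所有小于current_val的元素
--         if current_rank > 1:
--             smaller_count = ft.query_count(current_rank - 1)
--             smaller_sum = ft.query_sum(current_rank - 1)
--
--             # 计算当前元素与之前所有较小元素的正差值之和
--             contribution = current_val * smaller_count - smaller_sum
--             total_sum += contribution
--
--         # 将当前元素加入树状数组
--         ft.update(current_rank, current_val)
--
--     return total_sum
-- ===== SOURCE B (Python) =====
-- def calculate_with_coordinate_compression(arr):
--     total = 0
--     seen = []
--     for v in arr:
--         total += sum(v - x for x in seen if x < v)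
--         seen.append(v)
--     return total
-- ===== Notes on version B (the rewrite author's own statement) =====
-- stated objective: simpler
-- what changed: Replaces coordinate compression plus two Fenwick trees with a single pass over the list that keeps the values seen so far and directly adds v - x for every earlier smaller x.
import Mathlib
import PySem

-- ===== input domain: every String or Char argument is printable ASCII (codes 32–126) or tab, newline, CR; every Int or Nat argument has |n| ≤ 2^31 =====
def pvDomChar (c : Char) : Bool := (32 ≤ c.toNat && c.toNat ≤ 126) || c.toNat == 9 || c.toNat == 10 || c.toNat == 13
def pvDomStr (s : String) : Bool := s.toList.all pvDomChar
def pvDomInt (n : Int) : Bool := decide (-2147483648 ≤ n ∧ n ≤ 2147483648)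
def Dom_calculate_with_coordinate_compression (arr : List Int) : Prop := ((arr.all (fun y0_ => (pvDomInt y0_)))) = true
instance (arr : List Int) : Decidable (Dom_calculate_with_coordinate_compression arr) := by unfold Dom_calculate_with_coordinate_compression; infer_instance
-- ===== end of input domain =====

-- B replaces the coordinate-compression + Fenwick-tree machinery with a single pass over a plain
-- list of the values seen so far (simpler; not faster — O(n^2) vs A's O(n log n)).

-- ===== PORT A =====
-- idx & (-idx)
def pyLowbit (i : Int) : Int := PySem.Int.band i (-i)

-- FenwickTree.update: 'while idx <= self.size: count_tree[idx] += 1; sum_tree[idx] += val; idx += idx & (-idx)'.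
-- The while loop is ported with fuel size+1 (idx starts ≥ 1 and strictly increases each iteration, so the
-- Python loop runs at most size times).  All tree accesses A performs have 1 ≤ idx ≤ size < len(tree), so the
-- total pyGetD/pySetD forms are exact here.
def ftUpdate (size val : Int) : List Int → List Int → Int → Nat → List Int × List Int
  | ct, st, _,   0        => (ct, st)
  | ct, st, idx, fuel + 1 =>
    if idx ≤ size then
      ftUpdate size val
        (PySem.List.pySetD ct idx (PySem.List.pyGetD ct idx 0 + 1))
        (PySem.List.pySetD st idx (PySem.List.pyGetD st idx 0 + val))
        (idx + pyLowbit idx) fuel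
    else (ct, st)

-- FenwickTree.query_count / query_sum: 'while idx > 0: acc += tree[idx]; idx -= idx & (-idx)'.
-- Fuel ≥ idx suffices (idx strictly decreases, staying ≥ 0); the running accumulator is the recursion's sum.
def ftQuery (t : List Int) : Int → Nat → Int
  | _,   0        => 0
  | idx, fuel + 1 =>
    if 0 < idx then PySem.List.pyGetD t idx 0 + ftQuery t (idx - pyLowbit idx) fuel else 0

-- the body of 'for j in range(n)' (state = (count_tree, sum_tree, total_sum); current_val = arr[j]);
-- value_to_rank[current_val] is ported as getD 0: every arr value is a key, so KeyError is impossible.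
def aStep (value_to_rank : PySem.Dict Int Int) (size : Int)
    (s : List Int × List Int × Int) (current_val : Int) : List Int × List Int × Int :=
  let current_rank := value_to_rank.getD current_val 0
  let s2 :=
    if 1 < current_rank then
      let smaller_count := ftQuery s.1 (current_rank - 1) size.toNat
      let smaller_sum := ftQuery s.2.1 (current_rank - 1) size.toNat
      (s.1, s.2.1, s.2.2 + (current_val * smaller_count - smaller_sum))
    else s
  let r := ftUpdate size current_val s2.1 s2.2.1 current_rank (size.toNat + 1)
  (r.1, r.2, s2.2.2)

def calculate_with_coordinate_compression (arr : List Int) : Int :=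
  let n := PySem.List.len arr
  if n ≤ 1 then 0
  else
    let sorted_values := PySem.List.sorted (PySem.Set.ofList arr) (fun x => x) false
    let value_to_rank :=
      (PySem.List.enumerate sorted_values 0).foldl
        (fun d p => d.insert p.2 (p.1 + 1)) PySem.Dict.empty
    let size := PySem.List.len sorted_values
    -- 'for j in range(n): current_val = arr[j]; …' iterated as the fold over exactly those values
    (arr.foldl (aStep value_to_rank size)
      (List.replicate (size.toNat + 1) 0, List.replicate (size.toNat + 1) 0, 0)).2.2

-- ===== PORT B =====
-- loop body: 'total += sum(v - x for x in seen if x < v); seen.append(v)'  (state = (seen, total))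
def bStep (s : List Int × Int) (v : Int) : List Int × Int :=
  (s.1 ++ [v], s.2 + ((s.1.filter (fun x => decide (x < v))).map (fun x => v - x)).sum)

def calculate_with_coordinate_compression_alt (arr : List Int) : Int :=
  (arr.foldl bStep ([], 0)).2

-- ===== PRECONDITION & SPEC =====
def Spec_calculate_with_coordinate_compression (arr : List Int) (out : Int) : Prop := out = calculate_with_coordinate_compression_alt arr
instance (arr : List Int) (out : Int) : Decidable (Spec_calculate_with_coordinate_compression arr out) := by unfold Spec_calculate_with_coordinate_compression; infer_instance

-- ===== CLAIM (what is proved, stated in full; the proofs are below) =====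
def Claim_equal_calculate_with_coordinate_compression : Prop := ∀ (arr : List Int), Dom_calculate_with_coordinate_compression arr → Spec_calculate_with_coordinate_compression arr (calculate_with_coordinate_compression arr)

-- ===== LEMMAS AND PROOFS =====

-- ---- lowbit arithmetic on Nat ----
def lbN (n : Nat) : Nat := n - (n &&& (n - 1))

lemma land_two_mul_add_one (n : Nat) : (2 * n + 1) &&& (2 * n) = 2 * n := by
  apply Nat.eq_of_testBit_eq
  intro i
  rw [Nat.testBit_land]
  cases i with
  | zero => simp [Nat.testBit_zero]
  | succ j =>
      rw [Nat.testBit_add_one, Nat.testBit_add_one]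
      have h1 : (2 * n + 1) / 2 = n := by omega
      have h2 : (2 * n) / 2 = n := by omega
      rw [h1, h2, Bool.and_self]

lemma land_two_mul_pred (n : Nat) (h : 0 < n) :
    (2 * n) &&& (2 * n - 1) = 2 * (n &&& (n - 1)) := by
  apply Nat.eq_of_testBit_eq
  intro i
  rw [Nat.testBit_land]
  cases i with
  | zero => simp [Nat.testBit_zero]
  | succ j =>
      rw [Nat.testBit_add_one, Nat.testBit_add_one]
      have h1 : (2 * n) / 2 = n := by omega
      have h2 : (2 * n - 1) / 2 = n - 1 := by omega
      have h3 : (2 * (n &&& (n - 1))) / 2 = n &&& (n - 1) := by omega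
      rw [h1, h2]
      rw [Nat.testBit_add_one, h3, Nat.testBit_land]

lemma lbN_odd (n : Nat) : lbN (2 * n + 1) = 1 := by
  unfold lbN
  rw [show 2 * n + 1 - 1 = 2 * n by omega, land_two_mul_add_one]
  omega

lemma lbN_even (n : Nat) (h : 0 < n) : lbN (2 * n) = 2 * lbN n := by
  unfold lbN
  rw [land_two_mul_pred n h]
  omega

lemma lbN_le (n : Nat) : lbN n ≤ n := Nat.sub_le _ _

lemma lbN_pos (n : Nat) (h : 0 < n) : 0 < lbN n := by
  induction n using Nat.strong_induction_on with
  | _ n ih =>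
    rcases Nat.even_or_odd n with he | ho
    · obtain ⟨m, hm⟩ := he
      have hm' : n = 2 * m := by omega
      have hmpos : 0 < m := by omega
      rw [hm', lbN_even m hmpos]
      have := ih m (by omega) hmpos
      omega
    · obtain ⟨m, hm⟩ := ho
      rw [hm, lbN_odd]; omega

lemma lbN_F2 (n : Nat) (h : 0 < n) : 2 * lbN n ≤ lbN (n + lbN n) := by
  induction n using Nat.strong_induction_on with
  | _ n ih =>
    rcases Nat.even_or_odd n with he | ho
    · obtain ⟨m, hm⟩ := he
      have hm' : n = 2 * m := by omega
      have hmpos : 0 < m := by omega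
      rw [hm', lbN_even m hmpos, show 2 * m + 2 * lbN m = 2 * (m + lbN m) by ring,
          lbN_even (m + lbN m) (by omega)]
      have := ih m (by omega) hmpos
      omega
    · obtain ⟨m, hm⟩ := ho
      rw [hm, lbN_odd, show 2 * m + 1 + 1 = 2 * (m + 1) by ring, lbN_even (m + 1) (by omega)]
      have := lbN_pos (m + 1) (by omega)
      omega

lemma lbN_F3 (p r : Nat) (h1 : p - lbN p < r) (h2 : r < p) : r + lbN r ≤ p := by
  induction p using Nat.strong_induction_on generalizing r with
  | _ p ih =>
    rcases Nat.even_or_odd p with he | ho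
    · obtain ⟨q, hq⟩ := he
      have hp' : p = 2 * q := by omega
      have hqpos : 0 < q := by omega
      rcases Nat.even_or_odd r with hre | hro
      · obtain ⟨s, hs⟩ := hre
        have hr' : r = 2 * s := by omega
        rcases Nat.eq_zero_or_pos s with hs0 | hspos
        · rw [hr', hs0]; simp [lbN]
        · have hlq := lbN_le q
          have h1' : q - lbN q < s := by
            rw [hp', lbN_even q hqpos] at h1; omega
          have h2' : s < q := by omega
          have := ih q (by omega) (r := s) h1' h2'
          rw [hr', lbN_even s hspos, hp']
          omega
      · obtain ⟨s, hs⟩ := hro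
        rw [hs, lbN_odd]; omega
    · obtain ⟨q, hq⟩ := ho
      rw [hq] at h1 h2 ⊢
      rw [lbN_odd] at h1
      omega

-- ---- lowbit on Int (bridge to lbN) ----
lemma lbI_eq (n : Nat) (h : 0 < n) : pyLowbit (n : Int) = (lbN n : Int) := by
  unfold pyLowbit lbN
  rw [PySem.Int.band]
  rw [if_pos (by positivity), if_neg (by omega)]
  congr 1
  have h1 : ((n : Int)).toNat = n := by omega
  have h2 : (-(-(n : Int)) - 1).toNat = n - 1 := by omega
  rw [h1, h2]

lemma lbI_pos (i : Int) (h : 1 ≤ i) : 1 ≤ pyLowbit i := by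
  obtain ⟨n, rfl⟩ : ∃ n : Nat, i = (n : Int) := ⟨i.toNat, by omega⟩
  have hn : 0 < n := by exact_mod_cast h
  rw [lbI_eq n hn]
  have := lbN_pos n hn; omega

lemma lbI_le (i : Int) (h : 1 ≤ i) : pyLowbit i ≤ i := by
  obtain ⟨n, rfl⟩ : ∃ n : Nat, i = (n : Int) := ⟨i.toNat, by omega⟩
  have hn : 0 < n := by exact_mod_cast h
  rw [lbI_eq n hn]
  have := lbN_le n; omega

lemma lbI_F2 (i : Int) (h : 1 ≤ i) :
    (i + pyLowbit i) - pyLowbit (i + pyLowbit i) ≤ i - pyLowbit i := by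
  obtain ⟨n, rfl⟩ : ∃ n : Nat, i = (n : Int) := ⟨i.toNat, by omega⟩
  have hn : 0 < n := by exact_mod_cast h
  rw [lbI_eq n hn]
  rw [show (n : Int) + (lbN n : Int) = ((n + lbN n : Nat) : Int) by push_cast; ring]
  rw [lbI_eq (n + lbN n) (by omega)]
  have hF2 := lbN_F2 n hn
  have hle1 := lbN_le n
  have hle2 := lbN_le (n + lbN n)
  omega

lemma lbI_F3 (r p : Int) (hr : 1 ≤ r) (hrp : r < p) (h : p - pyLowbit p < r) :
    r + pyLowbit r ≤ p := by
  obtain ⟨a, rfl⟩ : ∃ a : Nat, r = (a : Int) := ⟨r.toNat, by omega⟩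
  obtain ⟨b, rfl⟩ : ∃ b : Nat, p = (b : Int) := ⟨p.toNat, by omega⟩
  have ha : 0 < a := by exact_mod_cast hr
  have hb : 0 < b := by omega
  rw [lbI_eq a ha]
  rw [lbI_eq b hb] at h
  have hleb := lbN_le b
  have hN : b - lbN b < a := by omega
  have := lbN_F3 b a hN (by exact_mod_cast hrp)
  omega

-- ---- update chain ----
def chainL (size : Int) : Int → Nat → List Int
  | _,   0        => []
  | idx, fuel + 1 => if idx ≤ size then idx :: chainL size (idx + pyLowbit idx) fuel else []

lemma chain_sub (size : Int) : ∀ (fuel : Nat) (idx p : Int), 1 ≤ idx →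
    p ∈ chainL size idx fuel →
    idx ≤ p ∧ p ≤ size ∧ p - pyLowbit p ≤ idx - pyLowbit idx := by
  intro fuel
  induction fuel with
  | zero => intro idx p _ hp; simp [chainL] at hp
  | succ n ih =>
    intro idx p hidx hp
    rw [chainL] at hp
    by_cases hle : idx ≤ size
    · rw [if_pos hle] at hp
      rcases List.mem_cons.mp hp with rfl | hp'
      · exact ⟨le_refl _, hle, le_refl _⟩
      · have hlb := lbI_pos idx hidx
        have h3 := ih (idx + pyLowbit idx) p (by omega) hp'
        have hF2 := lbI_F2 idx hidx
        exact ⟨by omega, h3.2.1, by omega⟩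
    · rw [if_neg hle] at hp; simp at hp

lemma chain_complete (size : Int) : ∀ (fuel : Nat) (idx p : Int), 1 ≤ idx →
    size + 1 - idx ≤ (fuel : Int) →
    idx ≤ p → p ≤ size → p - pyLowbit p < idx → p ∈ chainL size idx fuel := by
  intro fuel
  induction fuel with
  | zero => intro idx p _ hfuel hip hps _; exfalso; push_cast at hfuel; omega
  | succ n ih =>
    intro idx p hidx hfuel hip hps hlt
    rw [chainL, if_pos (by omega)]
    rcases eq_or_lt_of_le hip with rfl | hlt2
    · exact List.mem_cons_self
    · have hlb := lbI_pos idx hidx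
      have hstep := lbI_F3 idx p hidx hlt2 hlt
      apply List.mem_cons_of_mem
      exact ih (idx + pyLowbit idx) p (by omega)
        (by push_cast at hfuel ⊢; omega) hstep hps (by omega)

-- membership characterization with enough fuel
lemma chain_iff (size : Int) (fuel : Nat) (idx p : Int) (hidx : 1 ≤ idx)
    (hfuel : size + 1 - idx ≤ (fuel : Int)) :
    p ∈ chainL size idx fuel ↔ (idx ≤ p ∧ p ≤ size ∧ p - pyLowbit p < idx) := by
  constructor
  · intro hp
    have h := chain_sub size fuel idx p hidx hp
    have hlb := lbI_pos idx hidx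
    exact ⟨h.1, h.2.1, by have := h.2.2; omega⟩
  · intro ⟨h1, h2, h3⟩
    exact chain_complete size fuel idx p hidx hfuel h1 h2 h3

-- ---- the tree invariant ----
def TreeInv (t : List Int) (rk : Int → Int) (f : Int → Int) (P : List Int) (size : Int) : Prop :=
  t.length = size.toNat + 1 ∧
  ∀ p : Int, 1 ≤ p → p ≤ size →
    PySem.List.pyGetD t p 0 =
      ((P.filter (fun x => decide (p - pyLowbit p < rk x) && decide (rk x ≤ p))).map f).sum

lemma ftUpdate_len (size val : Int) : ∀ (fuel : Nat) (ct st : List Int) (idx : Int),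
    (ftUpdate size val ct st idx fuel).1.length = ct.length ∧
    (ftUpdate size val ct st idx fuel).2.length = st.length := by
  intro fuel
  induction fuel with
  | zero => intro ct st idx; exact ⟨rfl, rfl⟩
  | succ n ih =>
    intro ct st idx
    rw [ftUpdate]
    by_cases hle : idx ≤ size
    · rw [if_pos hle]
      have h := ih (PySem.List.pySetD ct idx (PySem.List.pyGetD ct idx 0 + 1))
        (PySem.List.pySetD st idx (PySem.List.pyGetD st idx 0 + val)) (idx + pyLowbit idx)
      rw [h.1, h.2, PySem.List.length_pySetD, PySem.List.length_pySetD]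
      exact ⟨rfl, rfl⟩
    · rw [if_neg hle]; exact ⟨rfl, rfl⟩

lemma getD_setD (t : List Int) (i p v : Int) (h0i : 1 ≤ i)
    (h0p : 1 ≤ p) (hp : p.toNat < t.length) :
    PySem.List.pyGetD (PySem.List.pySetD t i v) p 0 = if p = i then v else PySem.List.pyGetD t p 0 := by
  rw [PySem.List.pySetD_of_nonneg _ _ (by omega : (0:Int) ≤ i)]
  rw [PySem.List.pyGetD_eq_getElem _ _ (by omega) (by rw [List.length_set]; omega)]
  rw [PySem.List.pyGetD_eq_getElem _ _ (by omega) (by omega)]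
  rw [List.getElem_set]
  by_cases h : p = i
  · rw [if_pos h, if_pos (by omega)]
  · rw [if_neg h, if_neg (by omega)]

lemma ftUpdate_getD (size val : Int) (hsize : 0 ≤ size) :
    ∀ (fuel : Nat) (ct st : List Int) (idx : Int), 1 ≤ idx →
    ct.length = size.toNat + 1 → st.length = size.toNat + 1 →
    ∀ p : Int, 1 ≤ p → p ≤ size →
    PySem.List.pyGetD (ftUpdate size val ct st idx fuel).1 p 0
      = PySem.List.pyGetD ct p 0 + (if p ∈ chainL size idx fuel then 1 else 0) ∧
    PySem.List.pyGetD (ftUpdate size val ct st idx fuel).2 p 0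
      = PySem.List.pyGetD st p 0 + (if p ∈ chainL size idx fuel then val else 0) := by
  intro fuel
  induction fuel with
  | zero =>
    intro ct st idx _ _ _ p _ _
    simp [ftUpdate, chainL]
  | succ n ih =>
    intro ct st idx hidx hctl hstl p hp1 hp2
    rw [ftUpdate, chainL]
    by_cases hle : idx ≤ size
    · rw [if_pos hle, if_pos hle]
      have hlb := lbI_pos idx hidx
      have hIH := ih (PySem.List.pySetD ct idx (PySem.List.pyGetD ct idx 0 + 1))
        (PySem.List.pySetD st idx (PySem.List.pyGetD st idx 0 + val)) (idx + pyLowbit idx)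
        (by omega) (by rw [PySem.List.length_pySetD]; exact hctl)
        (by rw [PySem.List.length_pySetD]; exact hstl) p hp1 hp2
      have hnot : p = idx → p ∉ chainL size (idx + pyLowbit idx) n := by
        intro hpe hmem
        have := chain_sub size n (idx + pyLowbit idx) p (by omega) hmem
        omega
      have hct' : PySem.List.pyGetD (PySem.List.pySetD ct idx (PySem.List.pyGetD ct idx 0 + 1)) p 0
          = PySem.List.pyGetD ct p 0 + (if p = idx then 1 else 0) := by
        rw [getD_setD ct idx p _ hidx hp1 (by omega)]
        by_cases h : p = idx
        · rw [if_pos h, if_pos h, h]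
        · rw [if_neg h, if_neg h]; ring
      have hst' : PySem.List.pyGetD (PySem.List.pySetD st idx (PySem.List.pyGetD st idx 0 + val)) p 0
          = PySem.List.pyGetD st p 0 + (if p = idx then val else 0) := by
        rw [getD_setD st idx p _ hidx hp1 (by omega)]
        by_cases h : p = idx
        · rw [if_pos h, if_pos h, h]
        · rw [if_neg h, if_neg h]; ring
      rw [hIH.1, hIH.2, hct', hst']
      have hcons : (p ∈ idx :: chainL size (idx + pyLowbit idx) n)
          ↔ p = idx ∨ p ∈ chainL size (idx + pyLowbit idx) n := List.mem_cons
      constructor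
      · by_cases h : p = idx
        · rw [if_pos h, if_neg (hnot h), if_pos (hcons.mpr (Or.inl h))]
          ring
        · rw [if_neg h]
          by_cases hm : p ∈ chainL size (idx + pyLowbit idx) n
          · rw [if_pos hm, if_pos (hcons.mpr (Or.inr hm))]; ring
          · rw [if_neg hm, if_neg (fun hc => (hcons.mp hc).elim h hm)]; ring
      · by_cases h : p = idx
        · rw [if_pos h, if_neg (hnot h), if_pos (hcons.mpr (Or.inl h))]
          ring
        · rw [if_neg h]
          by_cases hm : p ∈ chainL size (idx + pyLowbit idx) n
          · rw [if_pos hm, if_pos (hcons.mpr (Or.inr hm))]; ring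
          · rw [if_neg hm, if_neg (fun hc => (hcons.mp hc).elim h hm)]; ring
    · rw [if_neg hle, if_neg hle]
      simp

-- generic sum-splitting helpers
lemma sum_filter_union (P : List Int) (f : Int → Int) (p q r : Int → Bool)
    (h : ∀ x ∈ P, (r x = (p x || q x)) ∧ ¬(p x = true ∧ q x = true)) :
    ((P.filter p).map f).sum + ((P.filter q).map f).sum = ((P.filter r).map f).sum := by
  induction P with
  | nil => simp
  | cons a tl ih =>
    have ha := h a List.mem_cons_self
    have hih := ih (fun x hx => h x (List.mem_cons_of_mem _ hx))
    simp only [List.filter_cons]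
    by_cases hp : p a = true
    · have hq : q a = false := by
        cases hq' : q a
        · rfl
        · exact absurd ⟨hp, hq'⟩ ha.2
      have hr : r a = true := by rw [ha.1, hp, hq]; simp
      simp only [hp, hq, hr, if_true, Bool.false_eq_true, if_false, List.map_cons, List.sum_cons]
      omega
    · have hp' : p a = false := eq_false_of_ne_true hp
      by_cases hqt : q a = true
      · have hr : r a = true := by rw [ha.1, hp', hqt]; simp
        simp only [hp', hqt, hr, if_true, Bool.false_eq_true, if_false, List.map_cons, List.sum_cons]
        omega
      · have hq' : q a = false := eq_false_of_ne_true hqt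
        have hr : r a = false := by rw [ha.1, hp', hq']; simp
        simp only [hp', hq', hr, Bool.false_eq_true, if_false]
        exact hih

lemma sum_vsub (F : List Int) (v : Int) :
    (F.map (fun x => v - x)).sum = v * (F.map (fun _ => (1 : Int))).sum - (F.map id).sum := by
  induction F with
  | nil => simp
  | cons a tl ih =>
    simp only [List.map_cons, List.sum_cons, id] at *
    rw [ih]; ring

lemma update_inv (size v ρ : Int) (rk f g : Int → Int) (ct st P : List Int)
    (hsize : 0 ≤ size) (hct : TreeInv ct rk f P size) (hst : TreeInv st rk g P size)
    (hρ : rk v = ρ) (h1 : 1 ≤ ρ) (h2 : ρ ≤ size) (hf : f v = 1) (hg : g v = v) :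
    TreeInv (ftUpdate size v ct st ρ (size.toNat + 1)).1 rk f (P ++ [v]) size ∧
    TreeInv (ftUpdate size v ct st ρ (size.toNat + 1)).2 rk g (P ++ [v]) size := by
  have hlen := ftUpdate_len size v (size.toNat + 1) ct st ρ
  obtain ⟨hctl, hctg⟩ := hct
  obtain ⟨hstl, hstg⟩ := hst
  have hg' := ftUpdate_getD size v hsize (size.toNat + 1) ct st ρ h1 hctl hstl
  have hchain : ∀ p : Int, 1 ≤ p → p ≤ size →
      (p ∈ chainL size ρ (size.toNat + 1) ↔ (p - pyLowbit p < ρ ∧ ρ ≤ p)) := by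
    intro p hp1 hp2
    rw [chain_iff size (size.toNat + 1) ρ p h1 (by push_cast; omega)]
    constructor
    · rintro ⟨a, b, c⟩; exact ⟨c, a⟩
    · rintro ⟨a, b⟩; exact ⟨b, hp2, a⟩
  constructor
  · refine ⟨by rw [hlen.1]; exact hctl, ?_⟩
    intro p hp1 hp2
    rw [(hg' p hp1 hp2).1, hctg p hp1 hp2,
        List.filter_append, List.map_append, List.sum_append]
    simp only [List.filter_cons, List.filter_nil]
    by_cases hc : p - pyLowbit p < ρ ∧ ρ ≤ p
    · rw [if_pos ((hchain p hp1 hp2).mpr hc),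
          if_pos (by rw [hρ]; simp only [Bool.and_eq_true, decide_eq_true_eq]; exact hc)]
      simp [hf]
    · rw [if_neg (fun hm => hc ((hchain p hp1 hp2).mp hm)),
          if_neg (by rw [hρ]; simp only [Bool.and_eq_true, decide_eq_true_eq]; exact hc)]
      simp
  · refine ⟨by rw [hlen.2]; exact hstl, ?_⟩
    intro p hp1 hp2
    rw [(hg' p hp1 hp2).2, hstg p hp1 hp2,
        List.filter_append, List.map_append, List.sum_append]
    simp only [List.filter_cons, List.filter_nil]
    by_cases hc : p - pyLowbit p < ρ ∧ ρ ≤ p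
    · rw [if_pos ((hchain p hp1 hp2).mpr hc),
          if_pos (by rw [hρ]; simp only [Bool.and_eq_true, decide_eq_true_eq]; exact hc)]
      simp [hg]
    · rw [if_neg (fun hm => hc ((hchain p hp1 hp2).mp hm)),
          if_neg (by rw [hρ]; simp only [Bool.and_eq_true, decide_eq_true_eq]; exact hc)]
      simp

lemma ftQuery_eq (t : List Int) (rk f : Int → Int) (P : List Int) (size : Int)
    (ht : TreeInv t rk f P size) :
    ∀ (fuel : Nat) (idx : Int), 0 ≤ idx → idx ≤ size → idx.toNat ≤ fuel →
    ftQuery t idx fuel =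
      ((P.filter (fun x => decide (0 < rk x) && decide (rk x ≤ idx))).map f).sum := by
  intro fuel
  induction fuel with
  | zero =>
    intro idx h0 hs hf
    have h00 : idx = 0 := by omega
    subst h00
    rw [ftQuery]
    have hnil : P.filter (fun x => decide (0 < rk x) && decide (rk x ≤ (0:Int))) = [] := by
      apply List.filter_eq_nil_iff.mpr
      intro x _
      simp only [Bool.and_eq_true, decide_eq_true_eq, not_and]
      omega
    rw [hnil]; simp
  | succ n ih =>
    intro idx h0 hs hf
    rw [ftQuery]
    by_cases hpos : 0 < idx
    · rw [if_pos hpos]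
      have hlb1 := lbI_pos idx (by omega)
      have hlble := lbI_le idx (by omega)
      have hIH := ih (idx - pyLowbit idx) (by omega) (by omega) (by omega)
      rw [hIH, ht.2 idx (by omega) hs]
      apply sum_filter_union
      intro x _
      constructor
      · apply Bool.eq_iff_iff.mpr
        simp only [Bool.and_eq_true, Bool.or_eq_true, decide_eq_true_eq]
        omega
      · simp only [Bool.and_eq_true, decide_eq_true_eq, not_and]
        intro h1 h2
        omega
    · rw [if_neg hpos]
      have h00 : idx = 0 := by omega
      subst h00
      have hnil : P.filter (fun x => decide (0 < rk x) && decide (rk x ≤ (0:Int))) = [] := by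
        apply List.filter_eq_nil_iff.mpr
        intro x _
        simp only [Bool.and_eq_true, decide_eq_true_eq, not_and]
        omega
      rw [hnil]; simp

-- ---- ranks ----
lemma sv_mono (sv : List Int) (hsv : sv.Pairwise (· < ·))
    (i j : Nat) (hi : i < sv.length) (hj : j < sv.length) :
    sv[i] < sv[j] ↔ i < j := by
  have mono := List.pairwise_iff_getElem.mp hsv
  constructor
  · intro hlt
    rcases Nat.lt_trichotomy i j with h | h | h
    · exact h
    · subst h; exact absurd hlt (lt_irrefl _)
    · exact absurd (mono j i hj hi h) (lt_asymm hlt)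
  · exact mono i j hi hj

-- ---- the main loop ----
lemma loop_eq (sv : List Int) (vtr : PySem.Dict Int Int) (size : Int)
    (hsize : size = (sv.length : Int))
    (hrk : ∀ (i : Nat) (hi : i < sv.length), vtr.getD sv[i] 0 = (i : Int) + 1)
    (hsv : sv.Pairwise (· < ·)) :
    ∀ (rest P ct st : List Int) (t : Int),
      (∀ x ∈ rest, x ∈ sv) → (∀ x ∈ P, x ∈ sv) →
      TreeInv ct (fun w => vtr.getD w 0) (fun _ => 1) P size →
      TreeInv st (fun w => vtr.getD w 0) id P size →
      (rest.foldl (aStep vtr size) (ct, st, t)).2.2 = (rest.foldl bStep (P, t)).2 := by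
  have hsize0 : 0 ≤ size := by rw [hsize]; positivity
  intro rest
  induction rest with
  | nil => intro P ct st t _ _ _ _; rfl
  | cons v rest ih =>
    intro P ct st t hrest hP hct hst
    have hv : v ∈ sv := hrest v List.mem_cons_self
    obtain ⟨i, hi, hvi⟩ := List.mem_iff_getElem.mp hv
    have hrkv : vtr.getD v 0 = (i : Int) + 1 := by rw [← hvi]; exact hrk i hi
    have hρ1 : 1 ≤ (i : Int) + 1 := by omega
    have hρs : (i : Int) + 1 ≤ size := by rw [hsize]; exact_mod_cast hi
    -- the filtered sublist of earlier strictly smaller values, in rank form and in value form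
    have hfilter : ∀ x ∈ P,
        (decide (0 < vtr.getD x 0) && decide (vtr.getD x 0 ≤ (i : Int) + 1 - 1)) = decide (x < v) := by
      intro x hx
      obtain ⟨j, hj, hxj⟩ := List.mem_iff_getElem.mp (hP x hx)
      have hrkx : vtr.getD x 0 = (j : Int) + 1 := by rw [← hxj]; exact hrk j hj
      apply Bool.eq_iff_iff.mpr
      simp only [Bool.and_eq_true, decide_eq_true_eq]
      rw [hrkx, ← hxj, ← hvi, sv_mono sv hsv j i hj hi]
      omega
    -- the new total after the if-branch equals B's
    have htot : (aStep vtr size (ct, st, t) v).2.2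
        = t + ((P.filter (fun x => decide (x < v))).map (fun x => v - x)).sum := by
      simp only [aStep, hrkv]
      by_cases hbig : 1 < (i : Int) + 1
      · rw [if_pos hbig]
        have hq1 := ftQuery_eq ct (fun w => vtr.getD w 0) (fun _ => 1) P size hct
          size.toNat ((i : Int) + 1 - 1) (by omega) (by omega) (by omega)
        have hq2 := ftQuery_eq st (fun w => vtr.getD w 0) id P size hst
          size.toNat ((i : Int) + 1 - 1) (by omega) (by omega) (by omega)
        simp only [hq1, hq2, List.filter_congr hfilter]
        rw [sum_vsub (P.filter (fun x => decide (x < v))) v]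
      · rw [if_neg hbig]
        have hi0 : i = 0 := by omega
        have hnil : P.filter (fun x => decide (x < v)) = [] := by
          apply List.filter_eq_nil_iff.mpr
          intro x hx
          obtain ⟨j, hj, hxj⟩ := List.mem_iff_getElem.mp (hP x hx)
          simp only [decide_eq_true_eq]
          intro hlt
          rw [← hxj, ← hvi] at hlt
          have := (sv_mono sv hsv j i hj hi).mp hlt
          omega
        rw [hnil]
        simp
    -- the trees after the update satisfy the invariant for P ++ [v]
    have hupd := update_inv size v ((i : Int) + 1) (fun w => vtr.getD w 0) (fun _ => 1) id
      ct st P hsize0 hct hst hrkv hρ1 hρs rfl rfl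
    have hcomp1 : (aStep vtr size (ct, st, t) v).1
        = (ftUpdate size v ct st ((i : Int) + 1) (size.toNat + 1)).1 := by
      simp only [aStep, hrkv]
      by_cases hbig : 1 < (i : Int) + 1
      · rw [if_pos hbig]
      · rw [if_neg hbig]
    have hcomp2 : (aStep vtr size (ct, st, t) v).2.1
        = (ftUpdate size v ct st ((i : Int) + 1) (size.toNat + 1)).2 := by
      simp only [aStep, hrkv]
      by_cases hbig : 1 < (i : Int) + 1
      · rw [if_pos hbig]
      · rw [if_neg hbig]
    simp only [List.foldl_cons]
    have hstep : aStep vtr size (ct, st, t) v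
        = ((ftUpdate size v ct st ((i : Int) + 1) (size.toNat + 1)).1,
           (ftUpdate size v ct st ((i : Int) + 1) (size.toNat + 1)).2,
           t + ((P.filter (fun x => decide (x < v))).map (fun x => v - x)).sum) := by
      refine Prod.ext hcomp1 (Prod.ext hcomp2 htot)
    rw [hstep, bStep]
    exact ih (P ++ [v])
      (ftUpdate size v ct st ((i : Int) + 1) (size.toNat + 1)).1
      (ftUpdate size v ct st ((i : Int) + 1) (size.toNat + 1)).2
      (t + ((P.filter (fun x => decide (x < v))).map (fun x => v - x)).sum)
      (fun x hx => hrest x (List.mem_cons_of_mem _ hx))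
      (fun x hx => by
        rcases List.mem_append.mp hx with h' | h'
        · exact hP x h'
        · rw [List.mem_singleton.mp h']; exact hv)
      hupd.1 hupd.2

-- ===== VERDICT (by name: the statement is the Claim_ definition above) =====
theorem calculate_with_coordinate_compression_spec : Claim_equal_calculate_with_coordinate_compression := by
  unfold Claim_equal_calculate_with_coordinate_compression
  intro arr _
  unfold Spec_calculate_with_coordinate_compression
  by_cases hn : PySem.List.len arr ≤ 1
  · have hlen : arr.length ≤ 1 := by rw [PySem.List.len_eq] at hn; exact_mod_cast hn
    match arr, hlen with
    | [], _ => rfl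
    | [x], _ =>
      simp [calculate_with_coordinate_compression, calculate_with_coordinate_compression_alt,
        bStep, PySem.List.len_eq]
  · simp only [calculate_with_coordinate_compression, calculate_with_coordinate_compression_alt]
    rw [if_neg hn]
    have hsv : (PySem.List.sorted (PySem.Set.ofList arr) (fun x => x) false).Pairwise (· < ·) :=
      PySem.List.sorted_ofList_pairwise_lt arr
    set sv := PySem.List.sorted (PySem.Set.ofList arr) (fun x => x) false with hsvdef
    have hnd : sv.Nodup := hsv.imp (fun {a b} h => ne_of_lt h)
    set vtr := (PySem.List.enumerate sv 0).foldl (fun d p => d.insert p.2 (p.1 + 1))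
      PySem.Dict.empty with hvtrdef
    have hitems : vtr.items = (PySem.List.enumerate sv 0).map (fun p => (p.2, p.1 + 1)) := by
      rw [hvtrdef]
      rw [PySem.Dict.items_foldl_insert_fresh (PySem.List.enumerate sv 0)
        (fun p => p.2) (fun p => p.1 + 1) PySem.Dict.empty
        (fun a _ => PySem.Dict.contains_empty _)
        (by rw [PySem.List.map_snd_enumerate]; exact hnd)]
      simp [PySem.Dict.empty]
    have hkeys : vtr.keys.Nodup := by
      rw [hvtrdef]
      exact PySem.Dict.nodup_keys_foldl_insert_key _ _ _ _ PySem.Dict.nodup_keys_empty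
    have hrk : ∀ (i : Nat) (hi : i < sv.length), vtr.getD sv[i] 0 = (i : Int) + 1 := by
      intro i hi
      have hmem : ((sv[i] : Int), (i : Int) + 1) ∈ vtr.items := by
        rw [hitems]
        apply List.mem_map.mpr
        exact ⟨((i : Int), sv[i]), (PySem.List.mem_enumerate_iff sv 0 _).mpr ⟨i, hi, by simp⟩, rfl⟩
      exact PySem.Dict.getD_of_mem_items vtr hmem hkeys 0
    have hmemsv : ∀ x ∈ arr, x ∈ sv := fun x hx =>
      (PySem.List.mem_sorted _ _ _ _).mpr ((PySem.Set.mem_ofList arr x).mpr hx)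
    have hinit : ∀ f : Int → Int,
        TreeInv (List.replicate ((PySem.List.len sv).toNat + 1) 0)
          (fun w => vtr.getD w 0) f [] (PySem.List.len sv) := by
      intro f
      constructor
      · simp
      · intro p hp1 hp2
        rw [PySem.List.len_eq] at hp2
        rw [PySem.List.pyGetD_eq_getElem _ _ (by omega)
          (by rw [List.length_replicate]; rw [PySem.List.len_eq]; push_cast; omega)]
        rw [List.getElem_replicate]
        simp
    exact loop_eq sv vtr (PySem.List.len sv) (PySem.List.len_eq sv) hrk hsv arr [] _ _ 0
      hmemsv (by simp) (hinit _) (hinit _)
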